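-- pv_equiv track=rewrite | github.com/taehan79-kim/Programmers | 프로그래머스/2/340212. ［PCCP 기출문제］ 2번 ／ 퍼즐 게임 챌린지/［PCCP 기출문제］ 2번 ／ 퍼즐 게임 챌린지.py | solution
-- ===== SOURCE A (Python) =====
-- def solution(diffs, times, limit):
--     answer = 1
--
--     st = 1
--     end = max(diffs)
--
--     max_level = 1
--
--     while st < end:
--         sum = 0
--         mid = (st + end)//2
--         for i in range(len(diffs)): # 푼 경우
--             if diffs[i] <= mid:
--                 sum += times[i]
--             else: # 못푼 경우
--                 sum += (diffs[i] - mid)*(times[i] + times[i-1])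
--                 sum += times[i]
--         if sum == limit:
--             return mid
--         elif sum < limit:
--             end = mid
--             max_level = mid
--         else:
--             st = mid + 1
--     answer = max_level
--     return st
-- ===== SOURCE B (Python) =====
-- def solution(diffs, times, limit):
--     # Stage 1: precompute, once, the base time (everything solved in one try)
--     # and each puzzle's retry weight w = times[i] + times[i-1] (wrap-around).
--     prevs = [times[-1]] + times[:-1]
--     base = sum(t for _, t in zip(diffs, times))
--     weights = [(d, t + p) for d, t, p in zip(diffs, times, prevs)]
--
--     # Stage 2: branch-free per-level cost from the precomputed weights.
--     def time_at(level):
--         return base + sum(max(d - level, 0) * w for d, w in weights)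
--
--     # Stage 3: recursive binary search over levels.
--     def search(lo, hi):
--         if hi <= lo:
--             return lo
--         mid = (lo + hi) // 2
--         t = time_at(mid)
--         if t > limit:
--             return search(mid + 1, hi)
--         if t < limit:
--             return search(lo, mid)
--         return mid
--
--     return search(1, max(diffs))
-- ===== Notes on version B (the rewrite author's own statement) =====
-- stated objective: alternative
-- what changed: B is staged: it precomputes once the base solve-time and a list of (difficulty, retry-weight) pairs with the wrap-around previous time folded in, evaluates each candidate level by the branch-free closed form base + sum(max(d-level,0)*w), and drives a recursive binary search, instead of A's mutating while loop that re-reads times[i]/times[i-1] by index with an if/else inside every iteration.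
-- outside the precondition, e.g. on solution([1], [], 5): A returns 1, B raises IndexError
import Mathlib
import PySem

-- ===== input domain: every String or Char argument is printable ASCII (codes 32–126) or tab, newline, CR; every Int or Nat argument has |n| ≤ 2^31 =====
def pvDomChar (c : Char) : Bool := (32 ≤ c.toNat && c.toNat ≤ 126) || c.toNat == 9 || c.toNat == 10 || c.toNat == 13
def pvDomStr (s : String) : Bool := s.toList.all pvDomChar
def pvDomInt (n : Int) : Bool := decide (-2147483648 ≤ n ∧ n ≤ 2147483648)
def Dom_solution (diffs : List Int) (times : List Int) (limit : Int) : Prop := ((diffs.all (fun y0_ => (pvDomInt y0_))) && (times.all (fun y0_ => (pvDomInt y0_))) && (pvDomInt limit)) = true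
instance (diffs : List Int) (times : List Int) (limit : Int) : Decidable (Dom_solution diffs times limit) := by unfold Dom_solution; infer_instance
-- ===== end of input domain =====

-- B stages the work: a one-time precomputation of the base solve-time and of
-- (difficulty, retry-weight) pairs with the wrap-around previous time folded in,
-- a branch-free per-level cost base + Σ max(d-level,0)·w, and a recursive binary
-- search replacing A's mutating while loop with per-iteration index arithmetic.

-- ===== PORT A =====
-- inner 'for i in range(len(diffs))' loop computing sum for a candidate mid
def sumA (diffs : List Int) (times : List Int) (mid : Int) : Int :=
  (List.range diffs.length).foldl (fun (s : Int) (i : Nat) =>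
    if PySem.List.pyGetD diffs (i : Int) 0 ≤ mid then
      s + PySem.List.pyGetD times (i : Int) 0
    else
      s + (PySem.List.pyGetD diffs (i : Int) 0 - mid) *
            (PySem.List.pyGetD times (i : Int) 0 + PySem.List.pyGetD times ((i : Int) - 1) 0)
        + PySem.List.pyGetD times (i : Int) 0) 0

-- the 'while st < end' binary search (max_level is tracked as in A, though A never returns it)
def solutionLoop (diffs : List Int) (times : List Int) (limit : Int)
    (st end_ maxLevel : Int) : Int :=
  if h : st < end_ then
    let mid := PySem.Int.floordiv (st + end_) 2
    let s := sumA diffs times mid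
    if s = limit then mid
    else if s < limit then solutionLoop diffs times limit st mid mid
    else solutionLoop diffs times limit (mid + 1) end_ maxLevel
  else st
termination_by (end_ - st).toNat
decreasing_by
  · have h2 : PySem.Int.floordiv (st + end_) 2 < end_ :=
      (PySem.Int.floordiv_lt_iff_lt_mul (by norm_num)).mpr (by omega)
    omega
  · have h1 := (PySem.Int.floordiv_two_mid_bounds (le_of_lt h)).1
    omega

def solution (diffs : List Int) (times : List Int) (limit : Int) : Int :=
  solutionLoop diffs times limit 1 ((PySem.List.max? diffs (fun x => x)).getD 0) 1

-- ===== PORT B =====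
-- [(d, t + p) for d, t, p in zip(diffs, times, [times[-1]] + times[:-1])]
def weightsB (diffs : List Int) (times : List Int) : List (Int × Int) :=
  (diffs.zip (times.zip (PySem.List.pyGetD times (-1) 0 :: times.dropLast))).map
    (fun x => (x.1, x.2.1 + x.2.2))

-- base + sum(max(d - level, 0) * w for d, w in weights)
def timeAtB (base : Int) (ws : List (Int × Int)) (level : Int) : Int :=
  base + (ws.map (fun x => max (x.1 - level) 0 * x.2)).sum

-- recursive search(lo, hi); branches ordered t > limit, t < limit, then mid
def searchB (base : Int) (ws : List (Int × Int)) (limit lo hi : Int) : Int :=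
  if h : hi ≤ lo then lo
  else
    let mid := PySem.Int.floordiv (lo + hi) 2
    let t := timeAtB base ws mid
    if limit < t then searchB base ws limit (mid + 1) hi
    else if t < limit then searchB base ws limit lo mid
    else mid
termination_by (hi - lo).toNat
decreasing_by
  · have h1 := (PySem.Int.floordiv_two_mid_bounds (by omega : lo ≤ hi)).1
    omega
  · have h2 : PySem.Int.floordiv (lo + hi) 2 < hi :=
      (PySem.Int.floordiv_lt_iff_lt_mul (by norm_num)).mpr (by omega)
    omega

def solution_alt (diffs : List Int) (times : List Int) (limit : Int) : Int :=
  searchB (((diffs.zip times).map (fun x => x.2)).sum) (weightsB diffs times) limit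
    1 ((PySem.List.max? diffs (fun x => x)).getD 0)

-- ===== PRECONDITION & SPEC =====
-- Pre_ excludes exactly: empty diffs (A raises ValueError on max); times shorter than
-- diffs when some difficulty exceeds 1 (A's summing loop indexes past times: IndexError);
-- and empty times with max(diffs) ≤ 1, where A returns 1 without ever touching times but
-- B's natural times[-1] precomputation raises — an artefact shape outside the problem's
-- parallel-array domain.
def Pre_solution (diffs : List Int) (times : List Int) (limit : Int) : Prop :=
  diffs ≠ [] ∧ times ≠ [] ∧
  (diffs.length ≤ times.length ∨ (PySem.List.max? diffs (fun x => x)).getD 0 ≤ 1)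
instance (diffs : List Int) (times : List Int) (limit : Int) : Decidable (Pre_solution diffs times limit) := by
  unfold Pre_solution; infer_instance

def pvWitness_solution : List Int × List Int × Int := ([1, 3, 2], [2, 3, 1], 10)

def Spec_solution (diffs : List Int) (times : List Int) (limit : Int) (out : Int) : Prop := out = solution_alt diffs times limit
instance (diffs : List Int) (times : List Int) (limit : Int) (out : Int) : Decidable (Spec_solution diffs times limit out) := by unfold Spec_solution; infer_instance

-- ===== CLAIM (what is proved, stated in full; the proofs are below) =====
def Claim_equal_solution : Prop := ∀ (diffs : List Int) (times : List Int) (limit : Int), Dom_solution diffs times limit → Pre_solution diffs times limit → Spec_solution diffs times limit (solution diffs times limit)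

-- ===== LEMMAS AND PROOFS =====

-- reference form of the total-time sum, structural in the two lists
def Tspec : List Int → List Int → Int → Int → Int
  | [], _, _, _ => 0
  | _ :: _, [], _, _ => 0
  | d :: ds, t :: ts, prev, lv =>
      (if d ≤ lv then t else (d - lv) * (t + prev) + t) + Tspec ds ts t lv

lemma timeAt_eq_Tspec (ds ts : List Int) (prev lv : Int) :
    ((ds.zip ts).map (fun x => x.2)).sum
      + (((ds.zip (ts.zip (prev :: ts.dropLast))).map (fun x => (x.1, x.2.1 + x.2.2))).map
          (fun x => max (x.1 - lv) 0 * x.2)).sum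
    = Tspec ds ts prev lv := by
  induction ds generalizing ts prev with
  | nil => simp [Tspec]
  | cons d ds ih =>
    cases ts with
    | nil => simp [Tspec]
    | cons t ts =>
      cases ts with
      | nil =>
        have hz : Tspec ds [] t lv = 0 := by cases ds <;> simp [Tspec]
        simp only [List.zip_cons_cons, List.zip_nil_left, List.zip_nil_right,
          List.map_cons, List.map_nil, List.sum_cons, List.sum_nil, Tspec, hz]
        by_cases h : d ≤ lv
        · rw [max_eq_right (by omega), if_pos h]; ring
        · rw [max_eq_left (by omega), if_neg h]; ring
      | cons t2 ts =>
        have hdl : (t :: t2 :: ts).dropLast = t :: (t2 :: ts).dropLast := rfl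
        rw [hdl]
        simp only [List.zip_cons_cons, List.map_cons, List.sum_cons, Tspec]
        rw [← ih (t2 :: ts) t]
        simp only [List.zip_cons_cons]
        by_cases h : d ≤ lv
        · rw [max_eq_right (by omega), if_pos h]; ring
        · rw [max_eq_left (by omega), if_neg h]; ring

-- A's indexed loop computes the same Tspec
lemma rangefold_eq_Tspec (diffs times : List Int) (lv : Int)
    (hlen : diffs.length ≤ times.length) :
    ∀ (m k : Nat) (s : Int), k + m = diffs.length →
      (List.range' k m).foldl (fun (s : Int) (i : Nat) =>
        if PySem.List.pyGetD diffs (i : Int) 0 ≤ lv then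
          s + PySem.List.pyGetD times (i : Int) 0
        else
          s + (PySem.List.pyGetD diffs (i : Int) 0 - lv) *
                (PySem.List.pyGetD times (i : Int) 0 + PySem.List.pyGetD times ((i : Int) - 1) 0)
            + PySem.List.pyGetD times (i : Int) 0) s
      = s + Tspec (diffs.drop k) (times.drop k) (PySem.List.pyGetD times ((k : Int) - 1) 0) lv := by
  intro m
  induction m with
  | zero =>
    intro k s hk
    have hdrop : diffs.drop k = [] := List.drop_eq_nil_of_le (by omega)
    simp [hdrop, Tspec]
  | succ m ih =>
    intro k s hk
    have hkd : k < diffs.length := by omega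
    have hkt : k < times.length := by omega
    rw [List.range'_succ, List.foldl_cons]
    rw [ih (k + 1) _ (by omega)]
    have hcast : (((k + 1 : Nat) : Int)) - 1 = (k : Int) := by push_cast; ring
    have hd : PySem.List.pyGetD diffs ((k : Nat) : Int) 0 = diffs[k] := by
      rw [PySem.List.pyGetD_natCast]; exact List.getD_eq_getElem diffs 0 hkd
    have ht : PySem.List.pyGetD times ((k : Nat) : Int) 0 = times[k] := by
      rw [PySem.List.pyGetD_natCast]; exact List.getD_eq_getElem times 0 hkt
    rw [List.drop_eq_getElem_cons hkd, List.drop_eq_getElem_cons hkt]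
    simp only [Tspec]
    rw [hcast, hd, ht]
    split_ifs <;> ring

lemma sumA_eq_timeAtB (diffs times : List Int) (lv : Int)
    (hlen : diffs.length ≤ times.length) :
    sumA diffs times lv
      = timeAtB (((diffs.zip times).map (fun x => x.2)).sum) (weightsB diffs times) lv := by
  unfold sumA timeAtB weightsB
  rw [List.range_eq_range', rangefold_eq_Tspec diffs times lv hlen diffs.length 0 0 (by omega)]
  norm_num
  rw [← timeAt_eq_Tspec diffs times (PySem.List.pyGetD times (-1) 0) lv]
  rw [List.map_map]

-- A's loop and B's recursion run in lock-step
lemma loop_eq_search (diffs times : List Int) (limit : Int)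
    (hlen : diffs.length ≤ times.length) :
    ∀ (n : Nat) (st end_ ml : Int), (end_ - st).toNat ≤ n →
      solutionLoop diffs times limit st end_ ml
        = searchB (((diffs.zip times).map (fun x => x.2)).sum) (weightsB diffs times) limit st end_ := by
  intro n
  induction n with
  | zero =>
    intro st end_ ml hn
    rw [solutionLoop, searchB, dif_neg (by omega : ¬ st < end_), dif_pos (by omega : end_ ≤ st)]
  | succ n ih =>
    intro st end_ ml hn
    rw [solutionLoop, searchB]
    by_cases hlt : st < end_
    · rw [dif_pos hlt, dif_neg (by omega : ¬ end_ ≤ st)]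
      simp only []
      have hm1 : st ≤ PySem.Int.floordiv (st + end_) 2 :=
        (PySem.Int.floordiv_two_mid_bounds (le_of_lt hlt)).1
      have hm2 : PySem.Int.floordiv (st + end_) 2 < end_ :=
        (PySem.Int.floordiv_lt_iff_lt_mul (by norm_num)).mpr (by omega)
      rw [sumA_eq_timeAtB diffs times _ hlen]
      set t := timeAtB (((diffs.zip times).map (fun x => x.2)).sum) (weightsB diffs times)
        (PySem.Int.floordiv (st + end_) 2) with ht
      by_cases he : t = limit
      · rw [if_pos he, if_neg (by omega), if_neg (by omega)]
      · rw [if_neg he]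
        by_cases hlt2 : t < limit
        · rw [if_pos hlt2, if_neg (by omega), if_pos hlt2]
          exact ih st _ _ (by omega)
        · rw [if_neg hlt2, if_pos (by omega)]
          exact ih _ end_ ml (by omega)
    · rw [dif_neg hlt, dif_pos (by omega : end_ ≤ st)]

-- ===== VERDICT (by name: the statement is the Claim_ definition above) =====
theorem solution_spec : Claim_equal_solution := by
  intro diffs times limit _ hpre
  obtain ⟨hne, htne, hca⟩ := hpre
  unfold Spec_solution solution solution_alt
  rcases hca with hlen | htop
  · exact loop_eq_search diffs times limit hlen
      ((PySem.List.max? diffs (fun x => x)).getD 0 - 1).toNat 1 _ 1 (by omega)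
  · rw [solutionLoop, searchB, dif_neg (by omega), dif_pos (by omega)]
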